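-- pv_equiv track=rewrite | github.com/manttoni/algorithms | putkaposti/kuninkaan_hevoset/hepat.py | mutual_and_readd
-- ===== SOURCE A (Python) =====
-- SIZE = 4
--
-- threats = [-2 * SIZE - 1, -2 * SIZE + 1, 2 - SIZE, 2 + SIZE, 2 * SIZE - 1, 2 * SIZE + 1, -2 + SIZE, -2 - SIZE]
--
-- def mandis(ida, idb):
--     x_a = ida % SIZE
--     x_b = idb % SIZE
--     y_a = ida // SIZE
--     y_b = idb // SIZE
--     return abs(x_a - x_b) + abs(y_a - y_b)
--
-- def nope(i, j):
--     row_diff = i // SIZE - j // SIZE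
--     col_diff = i % SIZE - j % SIZE
--     return abs(row_diff) + abs(col_diff) == 3 and row_diff != 0 and col_diff != 0
--
-- def mutual_and_readd(h1, h2):
--     ret = 0
--     for i in range(8):
--         t1 = h1 + threats[i]
--         if t1 < 0 or t1 >= SIZE *SIZE or mandis(t1, h1) != 3:
--             t1 = -1
--         t2 = h2 + threats[i]
--         if t2 < 0 or t2 >= SIZE *SIZE or mandis(t2, h2) != 3:
--             t2 = -1
--
--         if t1 != -1:
--             if nope(t1, h2): # fix mutual
--                 ret += 1
--             elif t1 < h2: # if wasnt mutual, readd a threat left of h2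
--                 ret += 1
--         if t2 != -1:
--             if t2 < h2: # readd a threat left of h2
--                 ret += 1
--
--     return ret
-- ===== SOURCE B (Python) =====
-- SIZE = 4
--
-- def knight(a, b):
--     # geometric knight relation between two square ids: row/col distances are 1 and 2
--     rd = abs(a // SIZE - b // SIZE)
--     cd = abs(a % SIZE - b % SIZE)
--     return (rd == 1 and cd == 2) or (rd == 2 and cd == 1)
--
-- def mutual_and_readd(h1, h2):
--     # scan the 16 board squares instead of enumerating the 8 knight offsets
--     ret = 0
--     for q in range(SIZE * SIZE):
--         if knight(q, h1) and (knight(q, h2) or q < h2):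
--             ret += 1
--         if knight(q, h2) and q < h2:
--             ret += 1
--     return ret
-- ===== Notes on version B (the rewrite author's own statement) =====
-- stated objective: alternative
-- what changed: Instead of enumerating the 8 knight offsets per knight with a Manhattan-distance validity test and a -1 sentinel, B scans the 16 board squares once and counts with a geometric knight predicate (row/col distances are 1 and 2).
import Mathlib
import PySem

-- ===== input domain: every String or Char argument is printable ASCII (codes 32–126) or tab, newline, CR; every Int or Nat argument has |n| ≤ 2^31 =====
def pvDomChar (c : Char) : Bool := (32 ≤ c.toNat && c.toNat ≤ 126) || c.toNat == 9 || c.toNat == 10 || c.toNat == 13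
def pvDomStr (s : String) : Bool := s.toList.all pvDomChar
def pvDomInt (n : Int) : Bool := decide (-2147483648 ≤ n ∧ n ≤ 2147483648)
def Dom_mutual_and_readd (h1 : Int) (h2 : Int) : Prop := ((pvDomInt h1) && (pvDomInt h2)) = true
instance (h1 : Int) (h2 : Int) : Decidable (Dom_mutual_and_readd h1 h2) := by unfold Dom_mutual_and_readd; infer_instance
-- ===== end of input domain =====

-- B replaces A's enumeration of the 8 knight offsets (with mandis-validity and a -1 sentinel)
-- by a scan of the 16 board squares using a geometric knight predicate (objective: alternative
-- decomposition, same cost).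

def pySIZE : Int := 4

-- ===== PORT A =====
-- module helpers used by A
def pyThreats : List Int :=
  [-2 * pySIZE - 1, -2 * pySIZE + 1, 2 - pySIZE, 2 + pySIZE,
   2 * pySIZE - 1, 2 * pySIZE + 1, -2 + pySIZE, -2 - pySIZE]

def pyMandis (ida idb : Int) : Int :=
  let x_a := PySem.Int.mod ida pySIZE
  let x_b := PySem.Int.mod idb pySIZE
  let y_a := PySem.Int.floordiv ida pySIZE
  let y_b := PySem.Int.floordiv idb pySIZE
  |x_a - x_b| + |y_a - y_b|

def pyNope (i j : Int) : Bool :=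
  let row_diff := PySem.Int.floordiv i pySIZE - PySem.Int.floordiv j pySIZE
  let col_diff := PySem.Int.mod i pySIZE - PySem.Int.mod j pySIZE
  decide (|row_diff| + |col_diff| = 3 ∧ row_diff ≠ 0 ∧ col_diff ≠ 0)

-- for i in range(8): … — A's loop body, folded over the threats list in order
def pvStepA (h1 h2 ret o : Int) : Int :=
  let t1 := h1 + o
  let t1 := if t1 < 0 ∨ t1 ≥ pySIZE * pySIZE ∨ pyMandis t1 h1 ≠ 3 then -1 else t1
  let t2 := h2 + o
  let t2 := if t2 < 0 ∨ t2 ≥ pySIZE * pySIZE ∨ pyMandis t2 h2 ≠ 3 then -1 else t2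
  let ret := if t1 ≠ -1 then
               (if pyNope t1 h2 then ret + 1 else if t1 < h2 then ret + 1 else ret)
             else ret
  if t2 ≠ -1 then (if t2 < h2 then ret + 1 else ret) else ret

def mutual_and_readd (h1 : Int) (h2 : Int) : Int :=
  pyThreats.foldl (pvStepA h1 h2) 0

-- ===== PORT B =====
-- def knight(a, b): rd/cd are the absolute row/column distances; knight iff they are 1 and 2
def pyKnight (a b : Int) : Bool :=
  let rd := |PySem.Int.floordiv a pySIZE - PySem.Int.floordiv b pySIZE|
  let cd := |PySem.Int.mod a pySIZE - PySem.Int.mod b pySIZE|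
  (rd == 1 && cd == 2) || (rd == 2 && cd == 1)

-- for q in range(SIZE*SIZE): … — B's loop body, folded over range(16) in order
def pvStepB (h1 h2 ret q : Int) : Int :=
  let ret := if pyKnight q h1 && (pyKnight q h2 || decide (q < h2)) then ret + 1 else ret
  if pyKnight q h2 && decide (q < h2) then ret + 1 else ret

def mutual_and_readd_alt (h1 : Int) (h2 : Int) : Int :=
  (PySem.List.pyRange 0 (pySIZE * pySIZE) 1).foldl (pvStepB h1 h2) 0

-- ===== PRECONDITION & SPEC =====
def Spec_mutual_and_readd (h1 : Int) (h2 : Int) (out : Int) : Prop := out = mutual_and_readd_alt h1 h2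
instance (h1 : Int) (h2 : Int) (out : Int) : Decidable (Spec_mutual_and_readd h1 h2 out) := by unfold Spec_mutual_and_readd; infer_instance

-- ===== CLAIM (what is proved, stated in full; the proofs are below) =====
def Claim_equal_mutual_and_readd : Prop := ∀ (h1 : Int) (h2 : Int), Dom_mutual_and_readd h1 h2 → Spec_mutual_and_readd h1 h2 (mutual_and_readd h1 h2)

-- ===== LEMMAS AND PROOFS =====
-- Strategy: both programs ignore everything about h1/h2 beyond their clamp into [-10, 25]
-- (outside that window no board square is a knight target of h, pyNope/pyKnight against h
-- are identically false on the board, and q < h is constant for board squares q), so both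
-- sides may be clamped and the remaining 36 × 36 finite statement is checked by `decide`.

def pvClamp (h : Int) : Int := max (-10) (min 25 h)

theorem pvClamp_bounds (h : Int) : -10 ≤ pvClamp h ∧ pvClamp h ≤ 25 := by
  unfold pvClamp; omega

theorem pvClamp_eq_self (h : Int) (h1 : -10 ≤ h) (h2 : h ≤ 25) : pvClamp h = h := by
  unfold pvClamp; omega

theorem pvClamp_far (h : Int) (hf : ¬ (-10 ≤ h ∧ h ≤ 25)) :
    pvClamp h ≤ -10 ∨ 25 ≤ pvClamp h := by
  unfold pvClamp; omega

-- A's validity test for t = h + o, in positive form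
theorem invalid_iff (t p : Int) :
    (t < 0 ∨ t ≥ pySIZE * pySIZE ∨ pyMandis t p ≠ 3)
      ↔ ¬(0 ≤ t ∧ t < pySIZE * pySIZE ∧ pyMandis t p = 3) := by
  constructor
  · rintro (h | h | h) ⟨a, b, c⟩
    · omega
    · omega
    · exact h c
  · intro h
    by_cases a : 0 ≤ t
    · by_cases b : t < pySIZE * pySIZE
      · exact Or.inr (Or.inr fun c => h ⟨a, b, c⟩)
      · exact Or.inr (Or.inl (by omega))
    · exact Or.inl (by omega)

-- A's loop body as an explicit sum of two guarded contributions
theorem stepA_eq (h1 h2 r o : Int) :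
    pvStepA h1 h2 r o
      = r + (if 0 ≤ h1 + o ∧ h1 + o < pySIZE * pySIZE ∧ pyMandis (h1 + o) h1 = 3 then
               (if pyNope (h1 + o) h2 then 1 else if h1 + o < h2 then 1 else 0)
             else 0)
          + (if 0 ≤ h2 + o ∧ h2 + o < pySIZE * pySIZE ∧ pyMandis (h2 + o) h2 = 3 then
               (if h2 + o < h2 then 1 else 0)
             else 0) := by
  simp only [pvStepA]
  by_cases hv1 : 0 ≤ h1 + o ∧ h1 + o < pySIZE * pySIZE ∧ pyMandis (h1 + o) h1 = 3 <;>
    by_cases hv2 : 0 ≤ h2 + o ∧ h2 + o < pySIZE * pySIZE ∧ pyMandis (h2 + o) h2 = 3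
  · rw [if_neg (fun h => (invalid_iff _ _).mp h hv1),
        if_neg (fun h => (invalid_iff _ _).mp h hv2),
        if_pos hv1, if_pos hv2]
    obtain ⟨ha1, -, -⟩ := hv1
    obtain ⟨ha2, -, -⟩ := hv2
    rw [if_pos (show h1 + o ≠ -1 by omega), if_pos (show h2 + o ≠ -1 by omega)]
    split_ifs <;> omega
  · rw [if_neg (fun h => (invalid_iff _ _).mp h hv1),
        if_pos ((invalid_iff _ _).mpr hv2),
        if_pos hv1, if_neg hv2]
    obtain ⟨ha1, -, -⟩ := hv1
    rw [if_pos (show h1 + o ≠ -1 by omega), if_neg (show ¬((-1 : Int) ≠ -1) by simp)]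
    split_ifs <;> omega
  · rw [if_pos ((invalid_iff _ _).mpr hv1),
        if_neg (fun h => (invalid_iff _ _).mp h hv2),
        if_neg hv1, if_pos hv2]
    obtain ⟨ha2, -, -⟩ := hv2
    rw [if_neg (show ¬((-1 : Int) ≠ -1) by simp), if_pos (show h2 + o ≠ -1 by omega)]
    split_ifs <;> omega
  · rw [if_pos ((invalid_iff _ _).mpr hv1), if_pos ((invalid_iff _ _).mpr hv2),
        if_neg hv1, if_neg hv2]
    rw [if_neg (show ¬((-1 : Int) ≠ -1) by simp), if_neg (show ¬((-1 : Int) ≠ -1) by simp)]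
    omega

-- far from the window no near offset lands on the board …
theorem valid_far (h o : Int) (ho1 : -9 ≤ o) (ho2 : o ≤ 9)
    (hf : h ≤ -10 ∨ 25 ≤ h) :
    ¬ (0 ≤ h + o ∧ h + o < pySIZE * pySIZE ∧ pyMandis (h + o) h = 3) := by
  rintro ⟨a, b, -⟩
  simp only [pySIZE] at a b
  omega

-- … pyNope against h is false on the board …
theorem nope_far (t h : Int) (ht1 : 0 ≤ t) (ht2 : t < 16) (hf : h ≤ -10 ∨ 25 ≤ h) :
    pyNope t h = false := by
  simp only [pyNope, pySIZE,
    PySem.Int.floordiv_eq_ediv_of_pos (b := (4 : Int)) (by norm_num),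
    PySem.Int.mod_eq_emod_of_pos (b := (4 : Int)) (by norm_num),
    decide_eq_false_iff_not]
  rcases abs_cases (t / 4 - h / 4) with ⟨p1, q1⟩ | ⟨p1, q1⟩ <;>
    rcases abs_cases (t % 4 - h % 4) with ⟨p2, q2⟩ | ⟨p2, q2⟩ <;>
    omega

-- … pyKnight against h is false on the board …
theorem knight_far (t h : Int) (ht1 : 0 ≤ t) (ht2 : t < 16) (hf : h ≤ -10 ∨ 25 ≤ h) :
    pyKnight t h = false := by
  simp only [pyKnight, pySIZE,
    PySem.Int.floordiv_eq_ediv_of_pos (b := (4 : Int)) (by norm_num),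
    PySem.Int.mod_eq_emod_of_pos (b := (4 : Int)) (by norm_num),
    Bool.or_eq_false_iff, Bool.and_eq_false_iff, beq_eq_false_iff_ne, ne_eq]
  rcases abs_cases (t / 4 - h / 4) with ⟨p1, q1⟩ | ⟨p1, q1⟩ <;>
    rcases abs_cases (t % 4 - h % 4) with ⟨p2, q2⟩ | ⟨p2, q2⟩ <;>
    constructor <;> (left; omega)

-- … and comparisons with board squares only see the clamp
theorem lt_clamp (t h : Int) (ht1 : 0 ≤ t) (ht2 : t < 16) : t < h ↔ t < pvClamp h := by
  unfold pvClamp; omega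

theorem nope_clamp (t h : Int) (ht1 : 0 ≤ t) (ht2 : t < 16) :
    pyNope t h = pyNope t (pvClamp h) := by
  by_cases hw : -10 ≤ h ∧ h ≤ 25
  · rw [pvClamp_eq_self h hw.1 hw.2]
  · rw [nope_far t h ht1 ht2 (by omega), nope_far t _ ht1 ht2 (pvClamp_far h hw)]

theorem knight_clamp (t h : Int) (ht1 : 0 ≤ t) (ht2 : t < 16) :
    pyKnight t h = pyKnight t (pvClamp h) := by
  by_cases hw : -10 ≤ h ∧ h ≤ 25
  · rw [pvClamp_eq_self h hw.1 hw.2]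
  · rw [knight_far t h ht1 ht2 (by omega), knight_far t _ ht1 ht2 (pvClamp_far h hw)]

theorem stepA_clamp (h1 h2 o r : Int) (ho1 : -9 ≤ o) (ho2 : o ≤ 9) :
    pvStepA h1 h2 r o = pvStepA (pvClamp h1) (pvClamp h2) r o := by
  rw [stepA_eq, stepA_eq]
  have e2 : (if 0 ≤ h2 + o ∧ h2 + o < pySIZE * pySIZE ∧ pyMandis (h2 + o) h2 = 3 then
               (if h2 + o < h2 then (1 : Int) else 0) else 0)
      = (if 0 ≤ pvClamp h2 + o ∧ pvClamp h2 + o < pySIZE * pySIZE ∧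
              pyMandis (pvClamp h2 + o) (pvClamp h2) = 3 then
               (if pvClamp h2 + o < pvClamp h2 then (1 : Int) else 0) else 0) := by
    by_cases hw : -10 ≤ h2 ∧ h2 ≤ 25
    · rw [pvClamp_eq_self h2 hw.1 hw.2]
    · rw [if_neg (valid_far h2 o ho1 ho2 (by omega)),
          if_neg (valid_far _ o ho1 ho2 (pvClamp_far h2 hw))]
  have e1 : (if 0 ≤ h1 + o ∧ h1 + o < pySIZE * pySIZE ∧ pyMandis (h1 + o) h1 = 3 then
               (if pyNope (h1 + o) h2 then (1 : Int) else if h1 + o < h2 then 1 else 0) else 0)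
      = (if 0 ≤ pvClamp h1 + o ∧ pvClamp h1 + o < pySIZE * pySIZE ∧
              pyMandis (pvClamp h1 + o) (pvClamp h1) = 3 then
               (if pyNope (pvClamp h1 + o) (pvClamp h2) then (1 : Int)
                else if pvClamp h1 + o < pvClamp h2 then 1 else 0) else 0) := by
    by_cases hw : -10 ≤ h1 ∧ h1 ≤ 25
    · rw [pvClamp_eq_self h1 hw.1 hw.2]
      by_cases hv : 0 ≤ h1 + o ∧ h1 + o < pySIZE * pySIZE ∧ pyMandis (h1 + o) h1 = 3
      · rw [if_pos hv, if_pos hv]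
        have hb1 : 0 ≤ h1 + o := hv.1
        have hb2 : h1 + o < 16 := by have := hv.2.1; simpa [pySIZE] using this
        rw [nope_clamp (h1 + o) h2 hb1 hb2]
        by_cases hn : pyNope (h1 + o) (pvClamp h2) = true
        · rw [if_pos hn, if_pos hn]
        · rw [if_neg hn, if_neg hn,
              if_congr (lt_clamp (h1 + o) h2 hb1 hb2) rfl rfl]
      · rw [if_neg hv, if_neg hv]
    · rw [if_neg (valid_far h1 o ho1 ho2 (by omega)),
          if_neg (valid_far _ o ho1 ho2 (pvClamp_far h1 hw))]
  rw [e1, e2]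

theorem stepB_clamp (h1 h2 q r : Int) (hq1 : 0 ≤ q) (hq2 : q < 16) :
    pvStepB h1 h2 r q = pvStepB (pvClamp h1) (pvClamp h2) r q := by
  simp only [pvStepB]
  have hd : decide (q < h2) = decide (q < pvClamp h2) := by
    rw [decide_eq_decide]; exact lt_clamp q h2 hq1 hq2
  rw [knight_clamp q h1 hq1 hq2, knight_clamp q h2 hq1 hq2, hd]

theorem clampA (h1 h2 : Int) :
    mutual_and_readd h1 h2 = mutual_and_readd (pvClamp h1) (pvClamp h2) := by
  unfold mutual_and_readd
  apply PySem.List.foldl_congr_mem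
  intro acc o ho
  have hb : -9 ≤ o ∧ o ≤ 9 := by
    simp only [pyThreats, pySIZE, List.mem_cons, List.not_mem_nil, or_false] at ho
    rcases ho with h | h | h | h | h | h | h | h <;> omega
  exact stepA_clamp h1 h2 o acc hb.1 hb.2

theorem clampB (h1 h2 : Int) :
    mutual_and_readd_alt h1 h2 = mutual_and_readd_alt (pvClamp h1) (pvClamp h2) := by
  unfold mutual_and_readd_alt
  apply PySem.List.foldl_congr_mem
  intro acc q hq
  rw [PySem.List.mem_pyRange_one] at hq
  exact stepB_clamp h1 h2 q acc hq.1 (by have := hq.2; simpa [pySIZE] using this)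

theorem fin_equal : ∀ i j : Fin 36,
    mutual_and_readd ((i : Int) - 10) ((j : Int) - 10)
      = mutual_and_readd_alt ((i : Int) - 10) ((j : Int) - 10) := by
  decide

-- ===== VERDICT (by name: the statement is the Claim_ definition above) =====
theorem mutual_and_readd_spec : Claim_equal_mutual_and_readd := by
  intro h1 h2 _
  unfold Spec_mutual_and_readd
  rw [clampA, clampB]
  obtain ⟨b1, b1'⟩ := pvClamp_bounds h1
  obtain ⟨b2, b2'⟩ := pvClamp_bounds h2
  have key := fin_equal ⟨(pvClamp h1 + 10).toNat, by omega⟩ ⟨(pvClamp h2 + 10).toNat, by omega⟩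
  have e1 : (((pvClamp h1 + 10).toNat : Int)) - 10 = pvClamp h1 := by omega
  have e2 : (((pvClamp h2 + 10).toNat : Int)) - 10 = pvClamp h2 := by omega
  simpa only [Fin.val_mk, e1, e2] using key
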